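-- pv_equiv track=rewrite | github.com/pypi-data/pypi-mirror-354 | packages/labelimgobb2DOTA-converter/labelimgobb2dota_converter-0.1.1-py3-none-any.whl/labelimgobb2DOTA_converter/utils/dataset_utils.py | validate_class_names
-- ===== SOURCE A (Python) =====
-- from typing import List
--
-- def validate_class_names(class_names: List[str]) -> bool:
--     """
--     验证类别名称的有效性
--
--     Args:
--         class_names: 类别名称列表
--
--     Returns:
--         bool: 是否有效
--     """
--     if not class_names:
--         return False
--
--     # 检查是否有空名称
--     for name in class_names:
--         if not name or not name.strip():
--             return False
--
--     # 检查是否有重复名称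
--     if len(class_names) != len(set(class_names)):
--         return False
--
--     return True
-- ===== SOURCE B (Python) =====
-- def validate_class_names(class_names):
--     if not class_names:
--         return False
--     for name in class_names:
--         if not name or not name.strip():
--             return False
--     ordered = sorted(class_names)
--     for i in range(1, len(ordered)):
--         if ordered[i - 1] == ordered[i]:
--             return False
--     return True
-- ===== Notes on version B (the rewrite author's own statement) =====
-- stated objective: alternative
-- what changed: Duplicate detection is done by sorting the list and scanning adjacent pairs for an equal neighbour, instead of building a hash set and comparing len(class_names) with len(set(class_names)).
import Mathlib
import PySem

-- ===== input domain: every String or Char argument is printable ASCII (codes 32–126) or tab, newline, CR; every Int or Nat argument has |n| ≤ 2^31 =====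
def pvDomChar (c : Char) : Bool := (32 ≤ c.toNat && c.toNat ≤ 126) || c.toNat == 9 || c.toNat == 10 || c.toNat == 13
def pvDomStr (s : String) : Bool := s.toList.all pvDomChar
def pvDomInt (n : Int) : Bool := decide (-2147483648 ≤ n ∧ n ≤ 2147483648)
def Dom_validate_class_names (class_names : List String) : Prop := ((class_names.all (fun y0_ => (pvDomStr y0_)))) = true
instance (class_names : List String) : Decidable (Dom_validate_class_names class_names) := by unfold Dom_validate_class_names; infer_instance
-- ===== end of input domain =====

-- B detects duplicates by sorting the list and scanning adjacent pairs, instead of A's set/len comparison (objective: alternative).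

-- ===== PORT A =====
-- "not name or not name.strip()" for one name
def vcnBad (name : String) : Bool :=
  name.toList.isEmpty || (PySem.Str.strip name).toList.isEmpty

def validate_class_names (class_names : List String) : Bool :=
  if class_names = [] then false
  else if class_names.any vcnBad then false
  else if class_names.length ≠ (PySem.Set.ofList class_names).length then false
  else true

-- ===== PORT B =====
-- the second for-loop of Source B: scan the sorted list for an equal adjacent pair
def vcnAdj : List String → Bool
  | [] => true
  | [_] => true
  | a :: b :: rest => if a == b then false else vcnAdj (b :: rest)

def validate_class_names_alt (class_names : List String) : Bool :=
  if class_names = [] then false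
  else if class_names.any vcnBad then false
  else vcnAdj (PySem.List.sorted class_names (fun x => x) false)

-- ===== PRECONDITION & SPEC =====
def Spec_validate_class_names (class_names : List String) (out : Bool) : Prop := out = validate_class_names_alt class_names
instance (class_names : List String) (out : Bool) : Decidable (Spec_validate_class_names class_names out) := by unfold Spec_validate_class_names; infer_instance

-- ===== CLAIM (what is proved, stated in full; the proofs are below) =====
def Claim_equal_validate_class_names : Prop := ∀ (class_names : List String), Dom_validate_class_names class_names → Spec_validate_class_names class_names (validate_class_names class_names)

-- ===== LEMMAS AND PROOFS =====

-- on a ≤-sorted list, "no equal adjacent pair" is exactly Nodup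
theorem vcnAdj_true_iff (xs : List String) (hs : xs.Pairwise (· ≤ ·)) :
    vcnAdj xs = true ↔ xs.Nodup := by
  induction xs with
  | nil => simp [vcnAdj]
  | cons a t ih =>
    cases t with
    | nil => simp [vcnAdj]
    | cons b r =>
      obtain ⟨ha, hs'⟩ := List.pairwise_cons.mp hs
      by_cases hab : a = b
      · subst hab
        simp [vcnAdj]
      · have : vcnAdj (a :: b :: r) = vcnAdj (b :: r) := by
          simp [vcnAdj, hab]
        rw [this, ih hs']
        constructor
        · intro hnd
          refine List.nodup_cons.mpr ⟨?_, hnd⟩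
          intro hmem
          rcases List.mem_cons.mp hmem with rfl | hmem'
          · exact hab rfl
          · -- a ∈ r; but a ≤ b and b ≤ a (from pairwise), so a = b
            have hba : b ≤ a := (List.pairwise_cons.mp hs').1 a hmem'
            have hab' : a ≤ b := ha b List.mem_cons_self
            exact hab (le_antisymm hab' hba)
        · intro hnd; exact (List.nodup_cons.mp hnd).2

theorem foldl_add_length (xs : List String) : ∀ (s : PySem.Set String), s.Nodup →
    ((xs.foldl PySem.Set.add s).length = s.length + xs.length ↔
      (xs.Nodup ∧ ∀ x ∈ xs, x ∉ s)) := by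
  induction xs with
  | nil => intro s _; simp
  | cons x xs ih =>
    intro s hs
    simp only [List.foldl_cons]
    by_cases hx : x ∈ s
    · rw [PySem.Set.add_of_mem hx]
      have hle : (xs.foldl PySem.Set.add s).length ≤ s.length + xs.length := by
        clear ih hs hx
        induction xs generalizing s with
        | nil => simp
        | cons y ys ihy =>
          simp only [List.foldl_cons]
          have := ihy (PySem.Set.add s y)
          have hl : (PySem.Set.add s y).length ≤ s.length + 1 := by
            rw [PySem.Set.add_eq_ite]; split <;> simp
          simp only [List.length_cons]
          omega
      constructor
      · intro h; exfalso; simp only [List.length_cons] at h; omega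
      · rintro ⟨_, h⟩; exact absurd hx (h x (List.mem_cons_self))
    · rw [PySem.Set.add_of_not_mem hx]
      have hs' : (s ++ [x]).Nodup := by
        simp [List.nodup_append, hs]
        intro y hy hxy; exact hx (hxy ▸ hy)
      have hlen : ((xs.foldl PySem.Set.add (s ++ [x])).length = s.length + (x :: xs).length)
          ↔ ((xs.foldl PySem.Set.add (s ++ [x])).length = (s ++ [x]).length + xs.length) := by
        simp only [List.length_append, List.length_cons, List.length_nil]
        omega
      rw [hlen, ih (s ++ [x]) hs']
      constructor
      · rintro ⟨h1, h2⟩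
        have hxx : x ∉ xs := fun hxm =>
          (h2 x hxm) (List.mem_append.mpr (Or.inr (List.mem_singleton.mpr rfl)))
        refine ⟨List.nodup_cons.mpr ⟨hxx, h1⟩, ?_⟩
        intro y hy
        rcases List.mem_cons.mp hy with rfl | hy'
        · exact hx
        · intro hys; exact (h2 y hy') (List.mem_append.mpr (Or.inl hys))
      · rintro ⟨h2, h3⟩
        obtain ⟨hxx, h1⟩ := List.nodup_cons.mp h2
        refine ⟨h1, ?_⟩
        intro y hy hmem
        rcases List.mem_append.mp hmem with hys | hyx
        · exact (h3 y (List.mem_cons_of_mem _ hy)) hys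
        · exact hxx (List.mem_singleton.mp hyx ▸ hy)

theorem ofList_length_iff (xs : List String) :
    ((PySem.Set.ofList xs).length = xs.length ↔ xs.Nodup) := by
  have := foldl_add_length xs [] List.nodup_nil
  simpa [PySem.Set.ofList_eq_foldl] using this

-- ===== VERDICT (by name: the statement is the Claim_ definition above) =====
theorem validate_class_names_spec : Claim_equal_validate_class_names := by
  intro xs _
  unfold Spec_validate_class_names
  unfold validate_class_names validate_class_names_alt
  by_cases hnil : xs = []
  · simp [hnil]
  · simp only [if_neg hnil]
    by_cases hany : xs.any vcnBad = true
    · simp [hany]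
    · simp only [Bool.not_eq_true] at hany
      simp only [hany, Bool.false_eq_true, if_false]
      have hperm : (PySem.List.sorted xs (fun x => x) false).Perm xs :=
        PySem.List.sorted_perm xs (fun x => x) false
      have hpair : (PySem.List.sorted xs (fun x => x) false).Pairwise (· ≤ ·) := by
        simpa using PySem.List.sorted_pairwise xs (fun x => x)
      rw [Bool.eq_iff_iff]
      rw [vcnAdj_true_iff _ hpair, hperm.nodup_iff]
      constructor
      · intro h
        by_cases h2 : xs.length ≠ (PySem.Set.ofList xs).length
        · simp [h2] at h
        · rw [not_not] at h2
          exact (ofList_length_iff xs).mp h2.symm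
      · intro hnd
        rw [if_neg (by simp [(ofList_length_iff xs).mpr hnd])]
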